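-- pv_equiv track=rewrite | github.com/miliar/Code_Jam_Webscraper | Solutions_python/Problem_184/1401.py | removenines
-- ===== SOURCE A (Python) =====
-- def removenines(l):
--     i = l.count('I')
--     for j in range(i):
--         l.remove('N')
--         l.remove('I')
--         l.remove('N')
--         l.remove('E')
--     return i, l
-- ===== SOURCE B (Python) =====
-- def removenines(l):
--     i = l.count('I')
--     n, ii, e = 2 * i, i, i
--     out = []
--     for x in l:
--         if x == 'N' and n:
--             n -= 1
--         elif x == 'I' and ii:
--             ii -= 1
--         elif x == 'E' and e:
--             e -= 1
--         else:
--             out.append(x)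
--     return i, out
-- ===== Notes on version B (the rewrite author's own statement) =====
-- stated objective: alternative
-- what changed: replaces the loop of repeated list.remove calls by one single pass that skips the leftmost 2i 'N's, i 'I's and i 'E's using three counters; B does not mutate l (return-value equivalence).
import Mathlib
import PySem

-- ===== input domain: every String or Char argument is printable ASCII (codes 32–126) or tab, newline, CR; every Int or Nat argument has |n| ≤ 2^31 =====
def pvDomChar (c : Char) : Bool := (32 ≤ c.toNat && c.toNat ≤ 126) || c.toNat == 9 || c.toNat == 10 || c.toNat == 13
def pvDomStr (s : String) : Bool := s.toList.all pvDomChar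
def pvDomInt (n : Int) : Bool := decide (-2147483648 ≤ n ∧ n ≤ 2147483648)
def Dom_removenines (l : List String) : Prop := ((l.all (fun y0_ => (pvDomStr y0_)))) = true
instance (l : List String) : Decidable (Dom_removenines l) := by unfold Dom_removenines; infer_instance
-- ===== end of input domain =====

-- B replaces A's loop of repeated list.remove scans by one linear pass with three skip
-- counters (a different algorithm of similar cost); A mutates l in place, B builds a fresh
-- list — the equivalence proved here is about the RETURN value only.

-- ===== PORT A =====
-- one iteration of A's for-loop body: l.remove('N'); l.remove('I'); l.remove('N'); l.remove('E')
-- (remove? = none means Python raises ValueError; Pre_ excludes those inputs, .getD is unreached there)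
def removeninesStep (l : List String) : List String :=
  let l1 := (PySem.List.remove? l "N").getD l
  let l2 := (PySem.List.remove? l1 "I").getD l1
  let l3 := (PySem.List.remove? l2 "N").getD l2
  (PySem.List.remove? l3 "E").getD l3

-- 'for j in range(i): <body>' as the obvious count-down recursion over the same list state
def removeninesLoop : Nat → List String → List String
  | 0, l => l
  | m + 1, l => removeninesLoop m (removeninesStep l)

def removenines (l : List String) : Int × List String :=
  let i := PySem.List.count l "I"
  ((i : Int), removeninesLoop i l)

-- ===== PORT B =====
-- single pass: skip the leftmost n "N"s, ii "I"s, e "E"s, keep everything else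
def removeninesGo : Nat → Nat → Nat → List String → List String
  | _, _, _, [] => []
  | n, ii, e, x :: xs =>
    if x = "N" ∧ n ≠ 0 then removeninesGo (n - 1) ii e xs
    else if x = "I" ∧ ii ≠ 0 then removeninesGo n (ii - 1) e xs
    else if x = "E" ∧ e ≠ 0 then removeninesGo n ii (e - 1) xs
    else x :: removeninesGo n ii e xs

def removenines_alt (l : List String) : Int × List String :=
  let i := PySem.List.count l "I"
  ((i : Int), removeninesGo (2 * i) i i l)

-- ===== PRECONDITION & SPEC =====
-- Pre_ excludes exactly the inputs where some l.remove raises ValueError: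
-- A needs 2*count('I') occurrences of 'N' and count('I') occurrences of 'E'.
def Pre_removenines (l : List String) : Prop :=
  2 * l.count "I" ≤ l.count "N" ∧ l.count "I" ≤ l.count "E"
instance (l : List String) : Decidable (Pre_removenines l) := by unfold Pre_removenines; infer_instance

def pvWitness_removenines : List String := ["N", "I", "N", "E", "X"]

def Spec_removenines (l : List String) (out : Int × List String) : Prop := out = removenines_alt l
instance (l : List String) (out : Int × List String) : Decidable (Spec_removenines l out) := by unfold Spec_removenines; infer_instance

-- ===== CLAIM (what is proved, stated in full; the proofs are below) =====
def Claim_equal_removenines : Prop := ∀ (l : List String), Dom_removenines l → Pre_removenines l → Spec_removenines l (removenines l)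

-- ===== LEMMAS AND PROOFS =====

-- remove the leftmost k occurrences of c
def skipC (c : String) : Nat → List String → List String
  | 0, l => l
  | k + 1, l => skipC c k (l.erase c)

theorem skipC_nil (c : String) : ∀ k : Nat, skipC c k ([] : List String) = [] := by
  intro k; induction k with
  | zero => rfl
  | succ k ih => exact ih

theorem skipC_cons_ne (c x : String) (h : x ≠ c) :
    ∀ (k : Nat) (xs : List String), skipC c k (x :: xs) = x :: skipC c k xs := by
  intro k
  induction k with
  | zero => intro xs; rfl
  | succ k ih =>
    intro xs
    show skipC c k ((x :: xs).erase c) = x :: skipC c k (xs.erase c)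
    rw [List.erase_cons_tail (by simpa using h)]
    exact ih (xs.erase c)

theorem skipC_cons_push (c x : String) (k : Nat) (xs : List String) (h : x ≠ c ∨ k = 0) :
    skipC c k (x :: xs) = x :: skipC c k xs := by
  rcases h with h | rfl
  · exact skipC_cons_ne c x h k xs
  · rfl

theorem skipC_cons_self (c : String) (k : Nat) (xs : List String) :
    skipC c (k + 1) (c :: xs) = skipC c k xs := by
  show skipC c k ((c :: xs).erase c) = skipC c k xs
  rw [List.erase_cons_head]

theorem erase_skipC (c c' : String) :
    ∀ (k : Nat) (l : List String), (skipC c k l).erase c' = skipC c k (l.erase c') := by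
  intro k
  induction k with
  | zero => intro l; rfl
  | succ k ih =>
    intro l
    show (skipC c k (l.erase c)).erase c' = skipC c k ((l.erase c').erase c)
    rw [ih (l.erase c), List.erase_comm]

theorem skipC_comm (c c' : String) :
    ∀ (j k : Nat) (l : List String),
      skipC c j (skipC c' k l) = skipC c' k (skipC c j l) := by
  intro j
  induction j with
  | zero => intro k l; rfl
  | succ j ih =>
    intro k l
    show skipC c j ((skipC c' k l).erase c) = skipC c' k (skipC c j (l.erase c))
    rw [erase_skipC, ih k (l.erase c)]

theorem skipC_add (c : String) :
    ∀ (k j : Nat) (l : List String), skipC c j (skipC c k l) = skipC c (j + k) l := by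
  intro k
  induction k with
  | zero => intro j l; rfl
  | succ k ih =>
    intro j l
    show skipC c j (skipC c k (l.erase c)) = skipC c (j + k) (l.erase c)
    exact ih j (l.erase c)

theorem count_skipC_ne (c c' : String) (h : c ≠ c') :
    ∀ (k : Nat) (l : List String), (skipC c' k l).count c = l.count c := by
  intro k
  induction k with
  | zero => intro l; rfl
  | succ k ih =>
    intro l
    show (skipC c' k (l.erase c')).count c = l.count c
    rw [ih (l.erase c'), List.count_erase_of_ne h]

theorem count_skipC_self (c : String) :
    ∀ (k : Nat) (l : List String), (skipC c k l).count c = l.count c - k := by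
  intro k
  induction k with
  | zero => intro l; simp [skipC]
  | succ k ih =>
    intro l
    show (skipC c k (l.erase c)).count c = l.count c - (k + 1)
    rw [ih (l.erase c), List.count_erase_self]
    omega

-- B's single pass is the composition of the three leftmost-k removals
theorem go_eq_skipC :
    ∀ (l : List String) (n ii e : Nat),
      removeninesGo n ii e l = skipC "N" n (skipC "I" ii (skipC "E" e l)) := by
  intro l
  induction l with
  | nil => intro n ii e; simp [removeninesGo, skipC_nil]
  | cons x xs ihl =>
    intro n ii e
    by_cases hN : x = "N" ∧ n ≠ 0
    · obtain ⟨hx, hn⟩ := hN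
      obtain ⟨n', rfl⟩ := Nat.exists_eq_succ_of_ne_zero hn
      subst hx
      rw [show removeninesGo (n' + 1) ii e ("N" :: xs) = removeninesGo (n' + 1 - 1) ii e xs by
        simp [removeninesGo]]
      rw [skipC_cons_push "E" "N" e xs (Or.inl (by decide)),
        skipC_cons_push "I" "N" ii _ (Or.inl (by decide)), skipC_cons_self]
      simpa using ihl n' ii e
    · by_cases hI : x = "I" ∧ ii ≠ 0
      · obtain ⟨hx, hii⟩ := hI
        obtain ⟨ii', rfl⟩ := Nat.exists_eq_succ_of_ne_zero hii
        subst hx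
        rw [show removeninesGo n (ii' + 1) e ("I" :: xs) = removeninesGo n (ii' + 1 - 1) e xs by
          simp [removeninesGo]]
        rw [skipC_cons_push "E" "I" e xs (Or.inl (by decide)), skipC_cons_self]
        simpa using ihl n ii' e
      · by_cases hE : x = "E" ∧ e ≠ 0
        · obtain ⟨hx, he⟩ := hE
          obtain ⟨e', rfl⟩ := Nat.exists_eq_succ_of_ne_zero he
          subst hx
          rw [show removeninesGo n ii (e' + 1) ("E" :: xs) = removeninesGo n ii (e' + 1 - 1) xs by
            simp [removeninesGo]]
          rw [skipC_cons_self]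
          simpa using ihl n ii e'
        · rw [show removeninesGo n ii e (x :: xs) = x :: removeninesGo n ii e xs by
            simp [removeninesGo, hN, hI, hE]]
          rw [skipC_cons_push "E" x e xs (by tauto),
            skipC_cons_push "I" x ii _ (by tauto),
            skipC_cons_push "N" x n _ (by tauto)]
          rw [ihl n ii e]

theorem remove_getD_of_mem (l : List String) (v : String) (h : v ∈ l) :
    (PySem.List.remove? l v).getD l = l.erase v := by
  rw [PySem.List.remove?_eq_some_erase l v h]
  rfl

-- one iteration of A's loop body, when enough occurrences remain
theorem step_eq_skipC (l : List String)
    (hN : 2 ≤ l.count "N") (hI : 1 ≤ l.count "I") (hE : 1 ≤ l.count "E") :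
    removeninesStep l = skipC "N" 2 (skipC "I" 1 (skipC "E" 1 l)) := by
  have mN1 : "N" ∈ l := List.count_pos_iff.mp (by omega)
  have cI1 : (l.erase "N").count "I" = l.count "I" :=
    List.count_erase_of_ne (by decide)
  have mI : "I" ∈ l.erase "N" := List.count_pos_iff.mp (by omega)
  have cN2 : ((l.erase "N").erase "I").count "N" = l.count "N" - 1 := by
    rw [List.count_erase_of_ne (by decide), List.count_erase_self]
  have mN2 : "N" ∈ (l.erase "N").erase "I" := List.count_pos_iff.mp (by omega)
  have cE : (((l.erase "N").erase "I").erase "N").count "E" = l.count "E" := by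
    rw [List.count_erase_of_ne (by decide), List.count_erase_of_ne (by decide),
      List.count_erase_of_ne (by decide)]
  have mE : "E" ∈ ((l.erase "N").erase "I").erase "N" := List.count_pos_iff.mp (by omega)
  show (PySem.List.remove? ((PySem.List.remove? ((PySem.List.remove? ((PySem.List.remove? l "N").getD l) "I").getD _) "N").getD _) "E").getD _ = _
  rw [remove_getD_of_mem l "N" mN1, remove_getD_of_mem _ "I" mI,
    remove_getD_of_mem _ "N" mN2, remove_getD_of_mem _ "E" mE]
  show (((l.erase "N").erase "I").erase "N").erase "E"
      = skipC "N" 1 ((skipC "I" 1 (skipC "E" 1 l)).erase "N")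
  rw [erase_skipC, erase_skipC]
  show (((l.erase "N").erase "I").erase "N").erase "E"
      = skipC "N" 1 (skipC "I" 1 (skipC "E" 1 ((l.erase "N"))))
  show (((l.erase "N").erase "I").erase "N").erase "E"
      = ((((l.erase "N").erase "E").erase "I")).erase "N"
  rw [List.erase_comm "N" "E" (l := (l.erase "N").erase "I"), List.erase_comm "I" "E" (l := l.erase "N")]

-- A's loop removes the leftmost 2m "N"s, m "I"s and m "E"s
theorem loop_eq_skipC :
    ∀ (m : Nat) (l : List String), 2 * m ≤ l.count "N" → m ≤ l.count "I" →
      m ≤ l.count "E" →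
      removeninesLoop m l = skipC "N" (2 * m) (skipC "I" m (skipC "E" m l)) := by
  intro m
  induction m with
  | zero => intro l _ _ _; rfl
  | succ m ih =>
    intro l hN hI hE
    have hstep : removeninesStep l = skipC "N" 2 (skipC "I" 1 (skipC "E" 1 l)) :=
      step_eq_skipC l (by omega) (by omega) (by omega)
    have cN : (removeninesStep l).count "N" = l.count "N" - 2 := by
      rw [hstep, count_skipC_self, count_skipC_ne _ _ (by decide),
        count_skipC_ne _ _ (by decide)]
    have cI : (removeninesStep l).count "I" = l.count "I" - 1 := by
      rw [hstep, count_skipC_ne _ _ (by decide), count_skipC_self,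
        count_skipC_ne _ _ (by decide)]
    have cE : (removeninesStep l).count "E" = l.count "E" - 1 := by
      rw [hstep, count_skipC_ne _ _ (by decide), count_skipC_ne _ _ (by decide),
        count_skipC_self]
    have := ih (removeninesStep l) (by omega) (by omega) (by omega)
    show removeninesLoop m (removeninesStep l) = _
    rw [this, hstep]
    rw [skipC_comm "E" "N", skipC_comm "E" "I", skipC_add "E",
      skipC_comm "I" "N", skipC_add "I", skipC_add "N"]
    have h2 : 2 * (m + 1) = 2 * m + 2 := by ring
    rw [h2]

-- ===== VERDICT (by name: the statement is the Claim_ definition above) =====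
theorem removenines_spec : Claim_equal_removenines := by
  intro l _ hpre
  obtain ⟨h1, h2⟩ := hpre
  unfold Spec_removenines removenines removenines_alt
  have hc : PySem.List.count l "I" = l.count "I" := PySem.List.count_eq l "I"
  rw [hc]
  refine Prod.ext rfl ?_
  show removeninesLoop (l.count "I") l = removeninesGo (2 * l.count "I") (l.count "I") (l.count "I") l
  rw [go_eq_skipC, loop_eq_skipC (l.count "I") l h1 le_rfl h2]
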